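-- pv_equiv track=rewrite | github.com/Nohate81/Sanctuary-Fork | sanctuary/mind/cognitive_core/meta_cognition/monitor.py | _detect_goal_conflicts
-- ===== SOURCE A (Python) =====
-- from typing import Optional, Dict, Any, List
--
-- def _detect_goal_conflicts(goals: List[Any]) -> bool:
--     """
--     Simple heuristic for conflicting goals.
--
--     Args:
--         goals: List of current goals
--
--     Returns:
--         True if conflicts detected, False otherwise
--     """
--     # Check if goals have opposing keywords
--     goal_texts = [
--         (g.description if hasattr(g, 'description') else g.get('description', '')).lower()
--         for g in goals
--     ]
--
--     conflict_pairs = [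
--         ("avoid", "engage"),
--         ("stop", "continue"),
--         ("hide", "reveal")
--     ]
--
--     for word1, word2 in conflict_pairs:
--         if any(
--             word1 in t and word2 in other
--             for t in goal_texts for other in goal_texts if t != other
--         ):
--             return True
--
--     return False
-- ===== SOURCE B (Python) =====
-- def _first_two_distinct(texts, word):
--     """First at most two DISTINCT texts that contain word (one pass)."""
--     seen = []
--     for t in texts:
--         if word in t and t not in seen:
--             seen.append(t)
--             if len(seen) == 2:
--                 break
--     return seen
--
-- def _detect_goal_conflicts(goals):
--     texts = [
--         (g.description if hasattr(g, 'description') else g.get('description', '')).lower()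
--         for g in goals
--     ]
--     for word1, word2 in [("avoid", "engage"), ("stop", "continue"), ("hide", "reveal")]:
--         s1 = _first_two_distinct(texts, word1)
--         s2 = _first_two_distinct(texts, word2)
--         if s1 and s2 and (len(s1) > 1 or len(s2) > 1 or s1[0] != s2[0]):
--             return True
--     return False
-- ===== Notes on version B (the rewrite author's own statement) =====
-- stated objective: alternative
-- what changed: Replaced the all-pairs scan over goal texts with a single linear pass per keyword that keeps at most two distinct matching texts, from which the existence of two distinct conflicting texts is decided directly.
import Mathlib
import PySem

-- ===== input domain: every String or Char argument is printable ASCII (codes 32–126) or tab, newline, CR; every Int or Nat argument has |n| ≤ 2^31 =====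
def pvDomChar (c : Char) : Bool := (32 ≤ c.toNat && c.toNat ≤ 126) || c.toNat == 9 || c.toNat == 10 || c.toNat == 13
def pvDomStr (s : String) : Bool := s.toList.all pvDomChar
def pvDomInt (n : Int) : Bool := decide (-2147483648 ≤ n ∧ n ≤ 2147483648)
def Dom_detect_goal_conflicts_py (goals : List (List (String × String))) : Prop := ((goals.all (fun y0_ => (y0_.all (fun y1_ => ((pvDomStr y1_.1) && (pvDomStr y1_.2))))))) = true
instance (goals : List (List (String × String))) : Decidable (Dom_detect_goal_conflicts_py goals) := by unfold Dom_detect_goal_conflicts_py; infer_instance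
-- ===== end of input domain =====

-- B replaces A's all-pairs text comparison by one linear pass per keyword keeping at
-- most two distinct matching texts (objective: alternative algorithm; timing did not
-- confirm a measurable speed-up on the generated inputs).

-- ===== PORT A =====
-- goals are dicts, so `hasattr(g, 'description')` is always False and the
-- `g.get('description', '')` branch is taken.
def detect_goal_conflicts_py (goals : List (List (String × String))) : Bool :=
  let goal_texts := goals.map (fun g => PySem.Str.lower ((PySem.Dict.mk g).getD "description" ""))
  let conflict_pairs : List (String × String) :=
    [("avoid", "engage"), ("stop", "continue"), ("hide", "reveal")]
  -- for word1, word2 in conflict_pairs: if any(...): return True / return False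
  conflict_pairs.any (fun p =>
    goal_texts.any (fun t => goal_texts.any (fun other =>
      (t != other) && (PySem.Str.isIn p.1 t && PySem.Str.isIn p.2 other))))

-- ===== PORT B =====
-- _first_two_distinct's loop (with the len == 2 break) as an accumulator recursion
def pvFTDgo (word : String) : List String → List String → List String
  | seen, [] => seen
  | seen, t :: rest =>
    if PySem.Str.isIn word t && !(seen.contains t) then
      if (seen ++ [t]).length == 2 then seen ++ [t]
      else pvFTDgo word (seen ++ [t]) rest
    else pvFTDgo word seen rest

def pvFirstTwoDistinct (texts : List String) (word : String) : List String :=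
  pvFTDgo word [] texts

def detect_goal_conflicts_py_alt (goals : List (List (String × String))) : Bool :=
  let texts := goals.map (fun g => PySem.Str.lower ((PySem.Dict.mk g).getD "description" ""))
  ([("avoid", "engage"), ("stop", "continue"), ("hide", "reveal")] : List (String × String)).any
    (fun p =>
      !(pvFirstTwoDistinct texts p.1).isEmpty &&
        (!(pvFirstTwoDistinct texts p.2).isEmpty &&
          (decide (1 < (pvFirstTwoDistinct texts p.1).length) ||
           decide (1 < (pvFirstTwoDistinct texts p.2).length) ||
           ((pvFirstTwoDistinct texts p.1).headD "" != (pvFirstTwoDistinct texts p.2).headD ""))))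

-- ===== PRECONDITION & SPEC =====
def Spec_detect_goal_conflicts_py (goals : List (List (String × String))) (out : Bool) : Prop := out = detect_goal_conflicts_py_alt goals
instance (goals : List (List (String × String))) (out : Bool) : Decidable (Spec_detect_goal_conflicts_py goals out) := by unfold Spec_detect_goal_conflicts_py; infer_instance

-- ===== CLAIM (what is proved, stated in full; the proofs are below) =====
def Claim_equal_detect_goal_conflicts_py : Prop := ∀ (goals : List (List (String × String))), Dom_detect_goal_conflicts_py goals → Spec_detect_goal_conflicts_py goals (detect_goal_conflicts_py goals)

-- ===== LEMMAS AND PROOFS =====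

-- characterization of the one-pass scan
lemma pvFTDgo_spec (w : String) (ts : List String) :
    ∀ (seen : List String), seen.length ≤ 1 → seen.Nodup →
    (∀ a ∈ pvFTDgo w seen ts, a ∈ seen ∨ (a ∈ ts ∧ PySem.Str.isIn w a = true)) ∧
    (∀ t ∈ ts, PySem.Str.isIn w t = true → t ∈ pvFTDgo w seen ts ∨ 2 ≤ (pvFTDgo w seen ts).length) ∧
    seen <+: pvFTDgo w seen ts ∧ (pvFTDgo w seen ts).length ≤ 2 ∧ (pvFTDgo w seen ts).Nodup := by
  induction ts with
  | nil =>
    intro seen hlen hnd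
    simp only [pvFTDgo]
    exact ⟨fun a ha => Or.inl ha, by simp, List.prefix_rfl, by omega, hnd⟩
  | cons t rest ih =>
    intro seen hlen hnd
    by_cases hmatch : (PySem.Str.isIn w t && !(seen.contains t)) = true
    · by_cases h2 : ((seen ++ [t]).length == 2) = true
      · have hres : pvFTDgo w seen (t :: rest) = seen ++ [t] := by
          simp only [pvFTDgo, hmatch, if_true, h2]
        simp only [Bool.and_eq_true, Bool.not_eq_true'] at hmatch
        rw [hres]
        refine ⟨?_, ?_, ?_, ?_, ?_⟩
        · intro a ha
          rcases List.mem_append.mp ha with h | h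
          · exact Or.inl h
          · simp at h; subst h; exact Or.inr ⟨by simp, hmatch.1⟩
        · intro u hu _
          right
          simp at h2 ⊢
          omega
        · exact ⟨[t], rfl⟩
        · simp at h2 ⊢; omega
        · refine List.Nodup.append hnd (by simp) ?_
          intro x hx hxt
          simp at hxt; subst hxt
          have := hmatch.2
          simp [List.contains_eq_mem] at this
          exact this hx
      · have hres : pvFTDgo w seen (t :: rest) = pvFTDgo w (seen ++ [t]) rest := by
          simp only [pvFTDgo]
          rw [if_pos hmatch, if_neg h2]
        simp only [Bool.and_eq_true, Bool.not_eq_true'] at hmatch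
        have hnotmem : t ∉ seen := by
          have := hmatch.2
          simpa [List.contains_eq_mem] using this
        have hlen' : (seen ++ [t]).length ≤ 1 := by
          simp only [List.length_append, List.length_cons, List.length_nil, beq_iff_eq] at h2 ⊢
          omega
        have hnd' : (seen ++ [t]).Nodup := by
          refine List.Nodup.append hnd (by simp) ?_
          intro x hx hxt
          simp at hxt; subst hxt; exact hnotmem hx
        obtain ⟨mem', cover', pre', len', nd'⟩ := ih (seen ++ [t]) hlen' hnd'
        rw [hres]
        refine ⟨?_, ?_, ?_, len', nd'⟩
        · intro a ha
          rcases mem' a ha with h | h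
          · rcases List.mem_append.mp h with h | h
            · exact Or.inl h
            · simp at h; subst h; exact Or.inr ⟨by simp, hmatch.1⟩
          · exact Or.inr ⟨List.mem_cons_of_mem _ h.1, h.2⟩
        · intro u hu hPu
          rcases List.mem_cons.mp hu with h | h
          · subst h
            left
            exact pre'.subset (by simp)
          · exact cover' u h hPu
        · exact List.IsPrefix.trans ⟨[t], rfl⟩ pre'
    · have hres : pvFTDgo w seen (t :: rest) = pvFTDgo w seen rest := by
        simp only [pvFTDgo]
        rw [if_neg hmatch]
      obtain ⟨mem', cover', pre', len', nd'⟩ := ih seen hlen hnd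
      rw [hres]
      refine ⟨?_, ?_, pre', len', nd'⟩
      · intro a ha
        rcases mem' a ha with h | h
        · exact Or.inl h
        · exact Or.inr ⟨List.mem_cons_of_mem _ h.1, h.2⟩
      · intro u hu hPu
        rcases List.mem_cons.mp hu with h | h
        · subst h
          -- u matched w but was already in seen
          have hc : seen.contains u = true := by
            cases hcc : seen.contains u with
            | true => rfl
            | false => exact absurd (by rw [hPu, hcc]; rfl) hmatch
          have hus : u ∈ seen := by simpa using hc
          exact Or.inl (pre'.subset hus)
        · exact cover' u h hPu

lemma pvFTD_mem (texts : List String) (w : String) :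
    ∀ a ∈ pvFirstTwoDistinct texts w, a ∈ texts ∧ PySem.Str.isIn w a = true := by
  intro a ha
  obtain ⟨mem, _, _, _, _⟩ := pvFTDgo_spec w texts [] (by simp) (by simp)
  rcases mem a ha with h | h
  · simp at h
  · exact h

lemma pvFTD_cover (texts : List String) (w : String) :
    ∀ t ∈ texts, PySem.Str.isIn w t = true →
      t ∈ pvFirstTwoDistinct texts w ∨ 2 ≤ (pvFirstTwoDistinct texts w).length := by
  obtain ⟨_, cover, _, _, _⟩ := pvFTDgo_spec w texts [] (by simp) (by simp)
  exact cover

lemma pvFTD_nodup (texts : List String) (w : String) :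
    (pvFirstTwoDistinct texts w).Nodup := by
  obtain ⟨_, _, _, _, nd⟩ := pvFTDgo_spec w texts [] (by simp) (by simp)
  exact nd

-- the per-pair equivalence
lemma pair_equiv (texts : List String) (w1 w2 : String) :
    (texts.any (fun t => texts.any (fun other =>
      (t != other) && (PySem.Str.isIn w1 t && PySem.Str.isIn w2 other))))
    = (!(pvFirstTwoDistinct texts w1).isEmpty &&
        (!(pvFirstTwoDistinct texts w2).isEmpty &&
          (decide (1 < (pvFirstTwoDistinct texts w1).length) ||
           decide (1 < (pvFirstTwoDistinct texts w2).length) ||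
           ((pvFirstTwoDistinct texts w1).headD "" != (pvFirstTwoDistinct texts w2).headD "")))) := by
  set s1 := pvFirstTwoDistinct texts w1 with hs1
  set s2 := pvFirstTwoDistinct texts w2 with hs2
  rw [Bool.eq_iff_iff]
  simp only [List.any_eq_true, Bool.and_eq_true, bne_iff_ne, ne_eq, Bool.not_eq_eq_eq_not,
    Bool.not_true, List.isEmpty_eq_false_iff, Bool.or_eq_true, decide_eq_true_eq]
  constructor
  · rintro ⟨t, ht, other, hother, htne, hP1, hP2⟩
    have hne1 : s1 ≠ [] := by
      rcases pvFTD_cover texts w1 t ht hP1 with h | h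
      · rw [← hs1] at h; exact List.ne_nil_of_mem h
      · rw [← hs1] at h; intro hnil; rw [hnil] at h; simp at h
    have hne2 : s2 ≠ [] := by
      rcases pvFTD_cover texts w2 other hother hP2 with h | h
      · rw [← hs2] at h; exact List.ne_nil_of_mem h
      · rw [← hs2] at h; intro hnil; rw [hnil] at h; simp at h
    refine ⟨hne1, hne2, ?_⟩
    by_cases hl1 : 1 < s1.length
    · exact Or.inl (Or.inl hl1)
    by_cases hl2 : 1 < s2.length
    · exact Or.inl (Or.inr hl2)
    right
    -- both singletons
    obtain ⟨a, ha⟩ : ∃ a, s1 = [a] := List.length_eq_one_iff.mp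
      (by have := List.length_pos_of_ne_nil hne1; omega)
    obtain ⟨b, hb⟩ : ∃ b, s2 = [b] := List.length_eq_one_iff.mp
      (by have := List.length_pos_of_ne_nil hne2; omega)
    have hta : t = a := by
      rcases pvFTD_cover texts w1 t ht hP1 with h | h
      · rw [← hs1, ha] at h; simpa using h
      · rw [← hs1, ha] at h; simp at h
    have hob : other = b := by
      rcases pvFTD_cover texts w2 other hother hP2 with h | h
      · rw [← hs2, hb] at h; simpa using h
      · rw [← hs2, hb] at h; simp at h
    rw [ha, hb]
    simp only [List.headD_cons]
    rw [← hta, ← hob]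
    exact htne
  · rintro ⟨hne1, hne2, hcase⟩
    rcases hcase with (hl1 | hl2) | hhd
    · -- s1 has two distinct elements; any element of s2 differs from one of them
      obtain ⟨a, s1', ha⟩ := List.exists_cons_of_ne_nil hne1
      have hs1ne : s1' ≠ [] := by
        intro h; rw [ha, h] at hl1; simp at hl1
      obtain ⟨c, restl, hc⟩ := List.exists_cons_of_ne_nil hs1ne
      have hac : s1 = a :: c :: restl := by rw [ha, hc]
      have hand := pvFTD_nodup texts w1
      rw [← hs1, hac] at hand
      have hacne : a ≠ c := by simp at hand; tauto
      have hmema := pvFTD_mem texts w1 a (by rw [← hs1, hac]; simp)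
      have hmemc := pvFTD_mem texts w1 c (by rw [← hs1, hac]; simp)
      obtain ⟨b, hbmem⟩ : ∃ b, b ∈ s2 := List.exists_mem_of_ne_nil s2 hne2
      have hmemb := pvFTD_mem texts w2 b hbmem
      by_cases hab : a = b
      · exact ⟨c, hmemc.1, b, hmemb.1, by rw [← hab]; exact fun h => hacne h.symm, hmemc.2, hmemb.2⟩
      · exact ⟨a, hmema.1, b, hmemb.1, hab, hmema.2, hmemb.2⟩
    · obtain ⟨a, s2', ha2⟩ := List.exists_cons_of_ne_nil hne2
      have hs2ne : s2' ≠ [] := by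
        intro h; rw [ha2, h] at hl2; simp at hl2
      obtain ⟨c, restl, hc2⟩ := List.exists_cons_of_ne_nil hs2ne
      have hac : s2 = a :: c :: restl := by rw [ha2, hc2]
      have hand := pvFTD_nodup texts w2
      rw [← hs2, hac] at hand
      have hacne : a ≠ c := by simp at hand; tauto
      have hmema := pvFTD_mem texts w2 a (by rw [← hs2, hac]; simp)
      have hmemc := pvFTD_mem texts w2 c (by rw [← hs2, hac]; simp)
      obtain ⟨b, hbmem⟩ : ∃ b, b ∈ s1 := List.exists_mem_of_ne_nil s1 hne1
      have hmemb := pvFTD_mem texts w1 b hbmem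
      by_cases hab : b = a
      · exact ⟨b, hmemb.1, c, hmemc.1, by rw [hab]; exact hacne, hmemb.2, hmemc.2⟩
      · exact ⟨b, hmemb.1, a, hmema.1, hab, hmemb.2, hmema.2⟩
    · -- heads differ
      obtain ⟨a, s1', ha⟩ := List.exists_cons_of_ne_nil hne1
      obtain ⟨b, s2', hb⟩ := List.exists_cons_of_ne_nil hne2
      rw [ha, hb] at hhd
      simp only [List.headD_cons] at hhd
      have hmema := pvFTD_mem texts w1 a (by rw [← hs1, ha]; simp)
      have hmemb := pvFTD_mem texts w2 b (by rw [← hs2, hb]; simp)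
      exact ⟨a, hmema.1, b, hmemb.1, hhd, hmema.2, hmemb.2⟩

-- ===== VERDICT (by name: the statement is the Claim_ definition above) =====
theorem detect_goal_conflicts_py_spec : Claim_equal_detect_goal_conflicts_py := by
  intro goals _
  unfold Spec_detect_goal_conflicts_py detect_goal_conflicts_py detect_goal_conflicts_py_alt
  simp only [List.any_cons, List.any_nil, Bool.or_false]
  rw [pair_equiv, pair_equiv, pair_equiv]
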